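-- pv_equiv track=rewrite | github.com/ViniGarcia/NFV-FLERAS | SFCExpansion.py | __seSeparateBranches
-- ===== SOURCE A (Python) =====
-- def __seSeparateBranches(splittedSFC):
--
-- 	sfcBranches = []
--
-- 	for index in range(0, len(splittedSFC)):
--
-- 		if splittedSFC[index] == '{':
-- 			processIndex = index + 1
-- 			jumpBraces = 0
-- 			while True:
-- 				if splittedSFC[processIndex] == '}':
-- 					if jumpBraces == 0:
-- 						sfcBranches.append(splittedSFC[index+1:processIndex])
-- 						break
-- 					else:
-- 						jumpBraces -= 1
-- 				if splittedSFC[processIndex] == '{':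
-- 					jumpBraces += 1
-- 				processIndex += 1
--
-- 	return sfcBranches
-- ===== SOURCE B (Python) =====
-- def __seSeparateBranches(splittedSFC):
--
-- 	stack = []
-- 	pairs = []
-- 	for i, token in enumerate(splittedSFC):
-- 		if token == '{':
-- 			stack.append(i)
-- 		elif token == '}' and stack:
-- 			pairs.append((stack.pop(), i))
-- 	pairs.sort(key=lambda p: p[0])
-- 	return [splittedSFC[i + 1:j] for i, j in pairs]
-- ===== Notes on version B (the rewrite author's own statement) =====
-- stated objective: alternative
-- what changed: Replaced A's per-'{' forward rescan (each opening brace re-scans ahead to find its matching close) by a single stack pass that collects (open, close) index pairs, then sorts them by opening index and slices; avoids the repeated nested scans at the cost of a sort.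
import Mathlib
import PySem

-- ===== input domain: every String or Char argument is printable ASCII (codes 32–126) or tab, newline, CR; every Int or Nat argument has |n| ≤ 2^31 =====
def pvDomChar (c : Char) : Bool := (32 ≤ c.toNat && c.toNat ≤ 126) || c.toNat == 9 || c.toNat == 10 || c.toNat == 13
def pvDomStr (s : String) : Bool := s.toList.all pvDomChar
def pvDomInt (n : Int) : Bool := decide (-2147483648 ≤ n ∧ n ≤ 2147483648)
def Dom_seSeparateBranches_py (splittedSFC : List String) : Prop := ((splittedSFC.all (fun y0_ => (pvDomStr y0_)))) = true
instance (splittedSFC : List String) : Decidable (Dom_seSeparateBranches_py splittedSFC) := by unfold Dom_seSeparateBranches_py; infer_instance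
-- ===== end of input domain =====

-- B replaces A's per-'{' forward rescan by one stack pass collecting (open, close) pairs,
-- then sorts by opening index (alternative algorithm, same measured cost on random inputs).

-- ===== PORT A =====
-- the 'while True' scan from processIndex = p with counter jumpBraces = jump;
-- 'none' is exactly Python's IndexError (processIndex runs past the end)
def aScan (s : List String) (p : Nat) (jump : Nat) : Option Nat :=
  if h : p < s.length then
    if s.getD p "" = "}" then
      if jump = 0 then some p else aScan s (p + 1) (jump - 1)
    else if s.getD p "" = "{" then aScan s (p + 1) (jump + 1)
    else aScan s (p + 1) jump
  else none
termination_by s.length - p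
decreasing_by all_goals omega

def seSeparateBranches_py (splittedSFC : List String) : List (List String) :=
  (List.range splittedSFC.length).foldl (fun sfcBranches index =>
    if splittedSFC.getD index "" = "{" then
      match aScan splittedSFC (index + 1) 0 with
      | some processIndex =>
          sfcBranches ++ [PySem.List.slice splittedSFC (some ((index : Int) + 1)) (some ((processIndex : Int)))]
      | none => sfcBranches      -- Python raises IndexError here; excluded by Pre_
    else sfcBranches) []

-- ===== PORT B =====
-- one pass: stack of open indices, emitted (open, close) pairs in close order
def bLoop : List String → Nat → List Nat → List (Nat × Nat) → List Nat × List (Nat × Nat)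
  | [], _, stack, pairs => (stack, pairs)
  | token :: rest, i, stack, pairs =>
    if token = "{" then bLoop rest (i + 1) (i :: stack) pairs
    else if token = "}" then
      match stack with
      | j :: stack' => bLoop rest (i + 1) stack' (pairs ++ [(j, i)])
      | [] => bLoop rest (i + 1) [] pairs
    else bLoop rest (i + 1) stack pairs

def seSeparateBranches_py_alt (splittedSFC : List String) : List (List String) :=
  (PySem.List.sorted (bLoop splittedSFC 0 [] []).2 (fun p => p.1) false).map
    (fun p => PySem.List.slice splittedSFC (some ((p.1 : Int) + 1)) (some ((p.2 : Int))))

-- ===== PRECONDITION & SPEC =====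
-- Pre_ excludes exactly the inputs on which A raises IndexError: an unmatched '{'
-- (some suffix starting at a '{' has more '{' than '}').
def Pre_seSeparateBranches_py (splittedSFC : List String) : Prop :=
  ∀ i < splittedSFC.length, splittedSFC.getD i "" = "{" →
    (splittedSFC.drop i).count "{" ≤ (splittedSFC.drop i).count "}"
instance (splittedSFC : List String) : Decidable (Pre_seSeparateBranches_py splittedSFC) := by
  unfold Pre_seSeparateBranches_py; infer_instance
def pvWitness_seSeparateBranches_py : List String := ["{", "a", "}"]

def Spec_seSeparateBranches_py (splittedSFC : List String) (out : List (List String)) : Prop := out = seSeparateBranches_py_alt splittedSFC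
instance (splittedSFC : List String) (out : List (List String)) : Decidable (Spec_seSeparateBranches_py splittedSFC out) := by unfold Spec_seSeparateBranches_py; infer_instance

-- ===== CLAIM (what is proved, stated in full; the proofs are below) =====
def Claim_equal_seSeparateBranches_py : Prop := ∀ (splittedSFC : List String), Dom_seSeparateBranches_py splittedSFC → Pre_seSeparateBranches_py splittedSFC → Spec_seSeparateBranches_py splittedSFC (seSeparateBranches_py splittedSFC)

-- ===== LEMMAS AND PROOFS =====

-- the matched pairs of opens below k that are not on the stack st, in opening order
def goodList (s : List String) (k : Nat) (st : List Nat) : List (Nat × Nat) :=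
  ((List.range k).filter (fun i => (s.getD i "" == "{") && !(st.contains i))).map
    (fun i => (i, (aScan s (i + 1) 0).getD 0))

theorem aScan_none_of_ge (s : List String) (p jump : Nat) (h : s.length ≤ p) :
    aScan s p jump = none := by
  rw [aScan]; simp [Nat.not_lt.mpr h]

theorem aScan_step_open (s : List String) (k d : Nat) (hk : k < s.length)
    (h : s.getD k "" = "{") : aScan s k d = aScan s (k + 1) (d + 1) := by
  rw [List.getD_eq_getElem _ _ hk] at h
  rw [aScan]; simp [hk, h]

theorem aScan_step_close_zero (s : List String) (k : Nat) (hk : k < s.length)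
    (h : s.getD k "" = "}") : aScan s k 0 = some k := by
  rw [List.getD_eq_getElem _ _ hk] at h
  rw [aScan]; simp [hk, h]

theorem aScan_step_close_succ (s : List String) (k d : Nat) (hk : k < s.length)
    (h : s.getD k "" = "}") : aScan s k (d + 1) = aScan s (k + 1) d := by
  rw [List.getD_eq_getElem _ _ hk] at h
  rw [aScan]; simp [hk, h]

theorem aScan_step_other (s : List String) (k d : Nat) (hk : k < s.length)
    (h1 : ¬ s.getD k "" = "{") (h2 : ¬ s.getD k "" = "}") :
    aScan s k d = aScan s (k + 1) d := by
  rw [List.getD_eq_getElem _ _ hk] at h1 h2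
  rw [aScan]; simp [hk, h1, h2]

theorem aScan_isSome (s : List String) :
    ∀ p jump, jump + (s.drop p).count "{" < (s.drop p).count "}" →
      (aScan s p jump).isSome := by
  have key : ∀ n p jump, s.length - p ≤ n →
      jump + (s.drop p).count "{" < (s.drop p).count "}" → (aScan s p jump).isSome := by
    intro n
    induction n with
    | zero =>
      intro p jump hle h
      have hp : s.length ≤ p := by omega
      rw [List.drop_eq_nil_of_le hp] at h
      simp at h
    | succ n ih =>
      intro p jump hle h
      by_cases hp : p < s.length
      · have hd : s.drop p = s[p] :: s.drop (p + 1) := List.drop_eq_getElem_cons hp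
        have hg : s.getD p "" = s[p] := List.getD_eq_getElem _ _ hp
        rw [hd, List.count_cons, List.count_cons] at h
        by_cases hc : s.getD p "" = "}"
        · rw [hg] at hc
          cases jump with
          | zero =>
            rw [aScan_step_close_zero s p hp (by rw [hg, hc])]
            rfl
          | succ m =>
            rw [aScan_step_close_succ s p m hp (by rw [hg, hc])]
            apply ih (p + 1) m (by omega)
            simp [hc] at h
            omega
        · by_cases ho : s.getD p "" = "{"
          · rw [hg] at ho hc
            rw [aScan_step_open s p jump hp (by rw [hg, ho])]
            apply ih (p + 1) (jump + 1) (by omega)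
            simp [ho] at h
            omega
          · rw [aScan_step_other s p jump hp ho hc]
            rw [hg] at ho hc
            apply ih (p + 1) jump (by omega)
            simp [ho, hc] at h
            omega
      · rw [List.drop_eq_nil_of_le (by omega)] at h
        simp at h
  intro p jump h
  exact key s.length p jump (by omega) h

theorem filter_perm_insert {l : List Nat} {P P' : Nat → Bool} {j : Nat}
    (hj : j ∈ l) (hnd : l.Nodup) (hPj : ¬ P j = true) (hP'j : P' j = true)
    (hagree : ∀ i ∈ l, i ≠ j → P' i = P i) :
    (l.filter P').Perm (l.filter P ++ [j]) := by
  induction l with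
  | nil => cases hj
  | cons a l ih =>
    by_cases haj : a = j
    · subst haj
      have hjl : a ∉ l := (List.nodup_cons.mp hnd).1
      have hfl : l.filter P' = l.filter P :=
        List.filter_congr (fun i hi => hagree i (List.mem_cons_of_mem a hi)
          (fun hij => hjl (hij ▸ hi)))
      rw [List.filter_cons, List.filter_cons, hfl]
      simp only [hP'j, if_true, hPj]
      exact (List.perm_append_singleton a (l.filter P)).symm
    · have hjl : j ∈ l := by
        rcases List.mem_cons.mp hj with h | h
        · exact absurd h.symm haj
        · exact h
      have ih' := ih hjl (List.nodup_cons.mp hnd).2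
        (fun i hi hij => hagree i (List.mem_cons_of_mem a hi) hij)
      have ha' : P' a = P a := hagree a List.mem_cons_self haj
      rw [List.filter_cons, List.filter_cons, ha']
      cases hPa : P a with
      | true => simpa [hPa] using ih'.cons a
      | false => simpa [hPa] using ih'

theorem goodList_succ_notin (s : List String) (k : Nat) (st : List Nat)
    (h : ¬ ((s.getD k "" == "{") && !(st.contains k)) = true) :
    goodList s (k + 1) st = goodList s k st := by
  unfold goodList
  rw [List.range_succ, List.filter_append]
  have h2 : (([k] : List Nat).filter (fun i => (s.getD i "" == "{") && !(st.contains i))) = [] := by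
    simp only [List.filter_cons, List.filter_nil]
    rw [if_neg h]
  rw [h2, List.append_nil]

theorem goodList_cons_of_le (s : List String) (k j : Nat) (st : List Nat) (hj : k ≤ j) :
    goodList s k (j :: st) = goodList s k st := by
  unfold goodList
  congr 1
  apply List.filter_congr
  intro i hi
  have hik : i < k := List.mem_range.mp hi
  have hne : i ≠ j := by omega
  simp [hne]

theorem goodList_of_ge (s : List String) (k : Nat) (st : List Nat) (h : s.length ≤ k) :
    goodList s k st = goodList s s.length st := by
  unfold goodList
  have : k = s.length + (k - s.length) := by omega
  rw [this, List.range_add, List.filter_append]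
  have h2 : ((List.range (k - s.length)).map (fun x => s.length + x)).filter
      (fun i => (s.getD i "" == "{") && !(st.contains i)) = [] := by
    rw [List.filter_eq_nil_iff]
    intro i hi
    obtain ⟨x, _, rfl⟩ := List.mem_map.mp hi
    rw [List.getD_eq_default _ _ (by omega)]
    simp
  rw [h2, List.append_nil]

theorem bLoop_inv (s : List String) :
    ∀ (rest : List String) (k : Nat) (st : List Nat) (pr : List (Nat × Nat)),
    rest = s.drop k →
    st.Nodup →
    (∀ i ∈ st, i < k ∧ s.getD i "" = "{") →
    (∀ d (hd : d < st.length), aScan s (st[d] + 1) 0 = aScan s k d) →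
    pr.Perm (goodList s k st) →
    (∀ i ∈ (bLoop rest k st pr).1,
        s.getD i "" = "{" ∧ aScan s (i + 1) 0 = none) ∧
    (bLoop rest k st pr).2.Perm (goodList s s.length (bLoop rest k st pr).1) := by
  intro rest
  induction rest with
  | nil =>
    intro k st pr hrest hnd hmem hsim hperm
    have hlen : s.length ≤ k := by
      have := congrArg List.length hrest
      simp at this
      omega
    simp only [bLoop]
    constructor
    · intro i hi
      obtain ⟨d, hd, rfl⟩ := List.mem_iff_getElem.mp hi
      refine ⟨(hmem _ hi).2, ?_⟩
      rw [hsim d hd, aScan_none_of_ge s k _ hlen]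
    · rw [← goodList_of_ge s k st hlen]
      exact hperm
  | cons tok rest' ih =>
    intro k st pr hrest hnd hmem hsim hperm
    have hk : k < s.length := by
      by_contra h
      push_neg at h
      rw [List.drop_eq_nil_of_le h] at hrest
      cases hrest
    have hds : s.drop k = s[k] :: s.drop (k + 1) := List.drop_eq_getElem_cons hk
    rw [hds] at hrest
    obtain ⟨htok, hrest'⟩ : tok = s[k] ∧ rest' = s.drop (k + 1) := by
      constructor <;> [exact (List.cons.injEq .. ▸ hrest).1; exact (List.cons.injEq .. ▸ hrest).2]
    have hg : s.getD k "" = tok := by rw [List.getD_eq_getElem _ _ hk, htok]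
    simp only [bLoop]
    by_cases ho : tok = "{"
    · rw [if_pos ho]
      apply ih (k + 1) (k :: st) pr hrest'
      · exact List.nodup_cons.mpr ⟨fun h => absurd ((hmem k h).1) (lt_irrefl k), hnd⟩
      · intro i hi
        rcases List.mem_cons.mp hi with h | h
        · exact ⟨h ▸ Nat.lt_succ_self k, by rw [h, hg, ho]⟩
        · exact ⟨Nat.lt_succ_of_lt (hmem i h).1, (hmem i h).2⟩
      · intro d hd
        cases d with
        | zero => simp
        | succ d' =>
          simp only [List.getElem_cons_succ]
          rw [hsim d' (by simpa using hd)]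
          exact aScan_step_open s k d' hk (by rw [hg, ho])
      · rw [goodList_succ_notin s k (k :: st) (by simp),
            goodList_cons_of_le s k k st le_rfl]
        exact hperm
    · rw [if_neg ho]
      by_cases hc : tok = "}"
      · rw [if_pos hc]
        cases st with
        | nil =>
          apply ih (k + 1) [] pr hrest' hnd
          · intro i hi; cases hi
          · intro d hd; simp at hd
          · rw [goodList_succ_notin s k [] (by rw [hg, hc]; simp)]
            exact hperm
        | cons j st' =>
          have hjk : aScan s (j + 1) 0 = some k := by
            have h0 := hsim 0 (by simp)
            simp only [List.getElem_cons_zero] at h0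
            rw [h0, aScan_step_close_zero s k hk (by rw [hg, hc])]
          have hjlt : j < k := (hmem j List.mem_cons_self).1
          have hjop : s.getD j "" = "{" := (hmem j List.mem_cons_self).2
          have hjst' : j ∉ st' := (List.nodup_cons.mp hnd).1
          apply ih (k + 1) st' (pr ++ [(j, k)]) hrest' (List.nodup_cons.mp hnd).2
          · intro i hi
            exact ⟨Nat.lt_succ_of_lt (hmem i (List.mem_cons_of_mem j hi)).1,
              (hmem i (List.mem_cons_of_mem j hi)).2⟩
          · intro d hd
            have := hsim (d + 1) (by simpa using hd)
            simp only [List.getElem_cons_succ] at this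
            rw [this]
            exact aScan_step_close_succ s k d hk (by rw [hg, hc])
          · rw [goodList_succ_notin s k st' (by rw [hg, hc]; simp)]
            have hfp := filter_perm_insert (l := List.range k)
              (P := fun i => (s.getD i "" == "{") && !((j :: st').contains i))
              (P' := fun i => (s.getD i "" == "{") && !(st'.contains i))
              (j := j) (List.mem_range.mpr hjlt) List.nodup_range
              (by simp)
              (by show ((s.getD j "" == "{") && !(st'.contains j)) = true
                  rw [hjop]; simp [hjst'])
              (fun i _ hij => by simp [hij])
            have hmp := hfp.map (fun i => (i, (aScan s (i + 1) 0).getD 0))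
            rw [List.map_append] at hmp
            have : ((([j] : List Nat)).map (fun i => (i, (aScan s (i + 1) 0).getD 0)))
                = [(j, k)] := by simp [hjk]
            rw [this] at hmp
            have h2 : (goodList s k st').Perm ((goodList s k (j :: st')) ++ [(j, k)]) := by
              unfold goodList
              exact hmp
            exact (hperm.append_right [(j, k)]).trans h2.symm
      · rw [if_neg hc]
        apply ih (k + 1) st pr hrest' hnd
        · intro i hi
          exact ⟨Nat.lt_succ_of_lt (hmem i hi).1, (hmem i hi).2⟩
        · intro d hd
          rw [hsim d hd]
          exact aScan_step_other s k d hk (by rw [hg]; exact ho) (by rw [hg]; exact hc)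
        · rw [goodList_succ_notin s k st (by rw [hg]; simp [ho])]
          exact hperm

theorem matched_of_pre (s : List String) (hpre : Pre_seSeparateBranches_py s) :
    ∀ i, i < s.length → s.getD i "" = "{" → (aScan s (i + 1) 0).isSome := by
  intro i hi hop
  have hcount := hpre i hi hop
  have hd : s.drop i = s[i] :: s.drop (i + 1) := List.drop_eq_getElem_cons hi
  have hg : s[i] = "{" := by rw [← List.getD_eq_getElem _ "" hi]; exact hop
  rw [hd, List.count_cons, List.count_cons, hg] at hcount
  apply aScan_isSome s (i + 1) 0
  simp at hcount
  omega

theorem pairs_perm (s : List String) (hpre : Pre_seSeparateBranches_py s) :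
    (bLoop s 0 [] []).2.Perm (goodList s s.length []) := by
  have h := bLoop_inv s s 0 [] [] (by simp) List.nodup_nil
    (fun i hi => by cases hi) (fun d hd => by simp at hd)
    (by simp [goodList])
  have hstack : (bLoop s 0 [] []).1 = [] := by
    rw [List.eq_nil_iff_forall_not_mem]
    intro i hi
    obtain ⟨hop, hnone⟩ := h.1 i hi
    have hlt : i < s.length := by
      by_contra hge
      rw [List.getD_eq_default _ _ (by omega)] at hop
      exact absurd hop (by decide)
    have := matched_of_pre s hpre i hlt hop
    rw [hnone] at this
    simp at this
  have := h.2
  rw [hstack] at this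
  exact this

theorem goodList_pairwise (s : List String) :
    (goodList s s.length []).Pairwise (fun p q => p.1 < q.1) := by
  unfold goodList
  rw [List.pairwise_map]
  exact List.Pairwise.filter _ List.pairwise_lt_range

theorem a_eq_goodList (s : List String) (hpre : Pre_seSeparateBranches_py s) :
    seSeparateBranches_py s = (goodList s s.length []).map
      (fun p => PySem.List.slice s (some ((p.1 : Int) + 1)) (some ((p.2 : Int)))) := by
  unfold seSeparateBranches_py
  suffices h : ∀ k, k ≤ s.length →
      (List.range k).foldl (fun sfcBranches index =>
        if s.getD index "" = "{" then
          match aScan s (index + 1) 0 with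
          | some processIndex =>
              sfcBranches ++ [PySem.List.slice s (some ((index : Int) + 1)) (some ((processIndex : Int)))]
          | none => sfcBranches
        else sfcBranches) [] = (goodList s k []).map
        (fun p => PySem.List.slice s (some ((p.1 : Int) + 1)) (some ((p.2 : Int)))) by
    exact h s.length le_rfl
  intro k
  induction k with
  | zero => intro _; simp [goodList]
  | succ k ih =>
    intro hk
    rw [List.range_succ, List.foldl_append, ih (by omega)]
    simp only [List.foldl_cons, List.foldl_nil]
    by_cases hop : s.getD k "" = "{"
    · obtain ⟨j, hj⟩ := Option.isSome_iff_exists.mp (matched_of_pre s hpre k (by omega) hop)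
      rw [if_pos hop, hj]
      unfold goodList
      rw [List.range_succ, List.filter_append, List.map_append, List.map_append]
      have hsing : (([k] : List Nat).filter (fun i => (s.getD i "" == "{") && !(([] : List Nat).contains i)))
          = [k] := by
        simp only [List.filter_cons, List.filter_nil]
        rw [if_pos (by rw [hop]; simp)]
      rw [hsing]
      simp [hj]
    · rw [if_neg hop, goodList_succ_notin s k [] (by
        intro hcontra
        simp only [Bool.and_eq_true, beq_iff_eq] at hcontra
        exact hop hcontra.1)]
-- ===== VERDICT (by name: the statement is the Claim_ definition above) =====
theorem seSeparateBranches_py_spec : Claim_equal_seSeparateBranches_py := by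
  intro s _ hpre
  unfold Spec_seSeparateBranches_py seSeparateBranches_py_alt
  rw [PySem.List.sorted_eq_of_perm_of_pairwise_lt (bLoop s 0 [] []).2 (goodList s s.length [])
        (fun p => p.1) (pairs_perm s hpre).symm (goodList_pairwise s)]
  exact a_eq_goodList s hpre
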